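-- pv_equiv track=rewrite | github.com/845jacques-gif/royalty-consolidator | mapper.py | _pick_best_sheet
-- ===== SOURCE A (Python) =====
-- from typing import Any, Dict, List, Optional, Tuple
--
-- def _pick_best_sheet(sheet_names: List[str]) -> str:
--     """Auto-select the most likely line-item data sheet from an Excel workbook.
--
--     Prefers sheets whose names suggest digital royalty detail data.
--     Falls back to the first sheet if nothing matches.
--     """
--     # Keywords that suggest line-item royalty data (ordered by priority)
--     PREFER_KW = [
--         'digital sales', 'digital', 'streaming', 'detail', 'royalt',
--         'line item', 'lineitem', 'transaction', 'sales', 'download',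
--         'mechanical', 'master',
--     ]
--     # Keywords that suggest summary / non-data tabs we want to skip
--     SKIP_KW = [
--         'summary', 'payment', 'invoice', 'cover', 'index', 'totals',
--         'instructions', 'notes', 'template', 'info',
--     ]
--
--     lower_names = [(s, s.lower().strip()) for s in sheet_names]
--
--     # First pass: pick the highest-priority PREFER keyword match
--     for kw in PREFER_KW:
--         for original, low in lower_names:
--             if kw in low:
--                 return original
--
--     # Second pass: pick the first sheet that isn't a SKIP sheet
--     for original, low in lower_names:
--         if not any(sk in low for sk in SKIP_KW):
--             return original
--
--     # Fallback: first sheet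
--     return sheet_names[0]
-- ===== SOURCE B (Python) =====
-- from typing import List, Optional
--
--
-- def _first_kw_index(kws: List[str], low: str) -> Optional[int]:
--     """Index of the first keyword in kws that occurs as a substring of low, else None."""
--     for i, kw in enumerate(kws):
--         if kw in low:
--             return i
--     return None
--
--
-- def _pick_best_sheet(sheet_names: List[str]) -> str:
--     PREFER_KW = [
--         'digital sales', 'digital', 'streaming', 'detail', 'royalt',
--         'line item', 'lineitem', 'transaction', 'sales', 'download',
--         'mechanical', 'master',
--     ]
--     SKIP_KW = [
--         'summary', 'payment', 'invoice', 'cover', 'index', 'totals',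
--         'instructions', 'notes', 'template', 'info',
--     ]
--
--     lows = [s.lower().strip() for s in sheet_names]
--
--     # First pass: score each sheet once (its best PREFER-keyword index),
--     # then take the position with the smallest score, earliest sheet winning ties.
--     best_pri = None
--     best_pos = None
--     for pos, low in enumerate(lows):
--         pri = _first_kw_index(PREFER_KW, low)
--         if pri is not None and (best_pri is None or pri < best_pri):
--             best_pri, best_pos = pri, pos
--     if best_pos is not None:
--         return sheet_names[best_pos]
--
--     # Second pass: first sheet that isn't a SKIP sheet
--     for pos, low in enumerate(lows):
--         if not any(sk in low for sk in SKIP_KW):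
--             return sheet_names[pos]
--
--     # Fallback: first sheet
--     return sheet_names[0]
-- ===== Notes on version B (the rewrite author's own statement) =====
-- stated objective: alternative
-- what changed: Inverts the first pass: instead of scanning all sheets once per PREFER keyword, B computes one priority score per sheet (the first matching keyword's index) and selects the sheet minimizing (score, position) in a single argmin pass.
import Mathlib
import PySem

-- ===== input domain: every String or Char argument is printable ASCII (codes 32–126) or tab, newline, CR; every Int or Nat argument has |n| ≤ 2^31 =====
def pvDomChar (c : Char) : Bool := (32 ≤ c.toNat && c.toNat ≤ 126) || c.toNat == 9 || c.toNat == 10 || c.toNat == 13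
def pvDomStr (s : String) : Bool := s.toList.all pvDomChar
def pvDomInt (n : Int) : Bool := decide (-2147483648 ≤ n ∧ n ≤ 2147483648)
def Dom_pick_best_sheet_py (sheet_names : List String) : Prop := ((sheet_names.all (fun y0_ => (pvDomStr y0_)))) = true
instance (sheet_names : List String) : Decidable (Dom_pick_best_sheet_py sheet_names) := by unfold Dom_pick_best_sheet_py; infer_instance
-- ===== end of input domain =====

-- B inverts A's first pass: one priority score per sheet, then a single argmin over
-- (score, position), instead of scanning all sheets once per PREFER keyword (alternative decomposition).


-- ===== PORT A =====
def preferKW : List String :=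
  ["digital sales", "digital", "streaming", "detail", "royalt",
   "line item", "lineitem", "transaction", "sales", "download",
   "mechanical", "master"]

def skipKW : List String :=
  ["summary", "payment", "invoice", "cover", "index", "totals",
   "instructions", "notes", "template", "info"]

-- inner loop of A's first pass: first sheet whose lowered name contains kw
def aFindSheet (kw : String) : List (String × String) → Option String
  | [] => none
  | (o, low) :: rest =>
      if PySem.Str.isIn kw low then some o else aFindSheet kw rest

-- A's first pass: keywords outer, sheets inner
def aPass1 : List String → List (String × String) → Option String
  | [], _ => none
  | kw :: kws, pairs =>
      match aFindSheet kw pairs with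
      | some o => some o
      | none => aPass1 kws pairs

-- A's second pass: first sheet with no SKIP keyword
def aPass2 : List (String × String) → Option String
  | [] => none
  | (o, low) :: rest =>
      if skipKW.any (fun sk => PySem.Str.isIn sk low) then aPass2 rest else some o

def pick_best_sheet_py (sheet_names : List String) : String :=
  let lowerNames := sheet_names.map (fun s => (s, PySem.Str.strip (PySem.Str.lower s)))
  match aPass1 preferKW lowerNames with
  | some o => o
  | none =>
    match aPass2 lowerNames with
    | some o => o
    | none => (PySem.List.pyGet? sheet_names 0).getD ""  -- sheet_names[0]; Pre_ excludes [], where Python raises IndexError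

-- ===== PORT B =====
-- _first_kw_index: index of first keyword of kws contained in low, else none
def bPriAux : List String → Nat → String → Option Nat
  | [], _, _ => none
  | kw :: kws, i, low =>
      if PySem.Str.isIn kw low then some i else bPriAux kws (i + 1) low

-- B's single argmin pass over sheets, carrying (best_pri, best_pos)
def bLoop (K : List String) : List String → Nat → Option (Nat × Nat) → Option (Nat × Nat)
  | [], _, best => best
  | low :: rest, pos, best =>
      let best' :=
        match bPriAux K 0 low, best with
        | none, _ => best
        | some pri, none => some (pri, pos)
        | some pri, some b => if pri < b.1 then some (pri, pos) else some b
      bLoop K rest (pos + 1) best'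

-- B's second pass: position of first sheet with no SKIP keyword
def bPass2 : List String → Nat → Option Nat
  | [], _ => none
  | low :: rest, pos =>
      if skipKW.any (fun sk => PySem.Str.isIn sk low) then bPass2 rest (pos + 1) else some pos

def pick_best_sheet_py_alt (sheet_names : List String) : String :=
  let lows := sheet_names.map (fun s => PySem.Str.strip (PySem.Str.lower s))
  match bLoop preferKW lows 0 none with
  | some b => (PySem.List.pyGet? sheet_names (b.2 : Int)).getD ""
  | none =>
    match bPass2 lows 0 with
    | some p => (PySem.List.pyGet? sheet_names (p : Int)).getD ""
    | none => (PySem.List.pyGet? sheet_names 0).getD ""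

-- ===== PRECONDITION & SPEC =====
-- Pre_ excludes only the empty list, on which Python A (and B) raise IndexError at the final fallback sheet_names[0].
def Pre_pick_best_sheet_py (sheet_names : List String) : Prop := sheet_names ≠ []
instance (sheet_names : List String) : Decidable (Pre_pick_best_sheet_py sheet_names) := by unfold Pre_pick_best_sheet_py; infer_instance

def pvWitness_pick_best_sheet_py : List String := ["Digital Sales", "Summary"]

def Spec_pick_best_sheet_py (sheet_names : List String) (out : String) : Prop := out = pick_best_sheet_py_alt sheet_names
instance (sheet_names : List String) (out : String) : Decidable (Spec_pick_best_sheet_py sheet_names out) := by unfold Spec_pick_best_sheet_py; infer_instance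

-- ===== CLAIM (what is proved, stated in full; the proofs are below) =====
def Claim_equal_pick_best_sheet_py : Prop := ∀ (sheet_names : List String), Dom_pick_best_sheet_py sheet_names → Pre_pick_best_sheet_py sheet_names → Spec_pick_best_sheet_py sheet_names (pick_best_sheet_py sheet_names)

-- ===== LEMMAS AND PROOFS =====

-- shifting the enumerate counter of _first_kw_index
theorem bPriAux_shift (kws : List String) (i : Nat) (low : String) :
    bPriAux kws (i + 1) low = (bPriAux kws i low).map (· + 1) := by
  induction kws generalizing i with
  | nil => simp [bPriAux]
  | cons kw kws ih =>
      simp only [bPriAux]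
      split
      · simp
      · exact ih (i + 1)

-- with no keywords, the argmin loop never updates
theorem bLoop_nil (lows : List String) (pos : Nat) (best : Option (Nat × Nat)) :
    bLoop [] lows pos best = best := by
  induction lows generalizing pos with
  | nil => rfl
  | cons low rest ih => simp [bLoop, bPriAux, ih]

-- a best entry of priority 0 is never displaced
theorem bLoop_zero (K : List String) (lows : List String) (pos p : Nat) :
    bLoop K lows pos (some (0, p)) = some (0, p) := by
  induction lows generalizing pos with
  | nil => rfl
  | cons low rest ih =>
      simp only [bLoop]
      cases h : bPriAux K 0 low with
      | none => simpa [h] using ih (pos + 1)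
      | some pri => simpa [h] using ih (pos + 1)

-- if no sheet contains kw, dropping kw from the keyword list shifts every priority by one
theorem bLoop_shift (kw : String) (kws : List String) (pairs : List (String × String))
    (pos : Nat) (best : Option (Nat × Nat)) (h : aFindSheet kw pairs = none) :
    bLoop (kw :: kws) (pairs.map Prod.snd) pos (best.map (fun b => (b.1 + 1, b.2)))
      = (bLoop kws (pairs.map Prod.snd) pos best).map (fun b => (b.1 + 1, b.2)) := by
  induction pairs generalizing pos best with
  | nil => simp [bLoop]
  | cons hd rest ih =>
      obtain ⟨o, low⟩ := hd
      simp only [aFindSheet, PySem.Str.isIn] at h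
      by_cases hkw : PySem.Chars.isIn kw.toList low.toList = true
      · simp [hkw] at h
      · simp only [hkw, ite_false] at h
        simp only [List.map_cons, bLoop, bPriAux, PySem.Str.isIn, hkw, ite_false, bPriAux_shift]
        cases hp : bPriAux kws 0 low with
        | none => simpa [hp] using ih (pos + 1) best h
        | some k =>
            cases best with
            | none => simpa [hp] using ih (pos + 1) (some (k, pos)) h
            | some b =>
                by_cases hlt : k < b.1
                · simpa [hp, hlt] using ih (pos + 1) (some (k, pos)) h
                · simpa [hp, hlt] using ih (pos + 1) (some b) h

-- if some sheet contains kw, B's loop settles on the first such sheet with priority 0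
theorem bLoop_hit (kw : String) (kws : List String) (pairs : List (String × String))
    (pos : Nat) (best : Option (Nat × Nat)) (o : String)
    (hbest : ∀ b, best = some b → 0 < b.1) (h : aFindSheet kw pairs = some o) :
    ∃ q, (pairs.map Prod.fst)[q]? = some o ∧
      bLoop (kw :: kws) (pairs.map Prod.snd) pos best = some (0, pos + q) := by
  induction pairs generalizing pos best with
  | nil => simp [aFindSheet] at h
  | cons hd rest ih =>
      obtain ⟨o', low⟩ := hd
      simp only [aFindSheet, PySem.Str.isIn] at h
      by_cases hkw : PySem.Chars.isIn kw.toList low.toList = true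
      · simp only [PySem.Str.isIn, hkw, ite_true] at h
        refine ⟨0, by simpa using h, ?_⟩
        have hb' : (match bPriAux (kw :: kws) 0 low, best with
            | none, _ => best
            | some pri, none => some (pri, pos)
            | some pri, some b => if pri < b.1 then some (pri, pos) else some b)
            = some (0, pos) := by
          simp only [bPriAux, PySem.Str.isIn, hkw, ite_true]
          cases best with
          | none => rfl
          | some b => simp [hbest b rfl]
        simp only [List.map_cons, bLoop, hb']
        simpa using bLoop_zero (kw :: kws) (rest.map Prod.snd) (pos + 1) pos
      · simp only [hkw, ite_false] at h
        have hpri : bPriAux (kw :: kws) 0 low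
            = (bPriAux kws 0 low).map (· + 1) := by
          simp [bPriAux, PySem.Str.isIn, hkw, bPriAux_shift]
        -- the updated best still has positive priority
        have step : ∃ best', (match bPriAux (kw :: kws) 0 low, best with
            | none, _ => best
            | some pri, none => some (pri, pos)
            | some pri, some b => if pri < b.1 then some (pri, pos) else some b) = best'
            ∧ ∀ b, best' = some b → 0 < b.1 := by
          rw [hpri]
          cases hp : bPriAux kws 0 low with
          | none => exact ⟨best, rfl, hbest⟩
          | some k =>
              cases best with
              | none => exact ⟨some (k + 1, pos), rfl, by rintro b ⟨rfl⟩; simp⟩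
              | some b =>
                  by_cases hlt : k + 1 < b.1
                  · exact ⟨some (k + 1, pos), by simp [hlt], by rintro b' ⟨rfl⟩; simp⟩
                  · exact ⟨some b, by simp [hlt], hbest⟩
        obtain ⟨best', hb', hpos'⟩ := step
        obtain ⟨q, hq1, hq2⟩ := ih (pos + 1) best' hpos' h
        refine ⟨q + 1, by simpa using hq1, ?_⟩
        simp only [List.map_cons, bLoop, hb']
        have harith : pos + 1 + q = pos + (q + 1) := by omega
        rw [hq2, harith]

-- first-pass equivalence: B's argmin position indexes exactly the sheet A's nested scan returns
theorem pass1_eq (K : List String) (pairs : List (String × String)) :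
    match bLoop K (pairs.map Prod.snd) 0 none with
    | none => aPass1 K pairs = none
    | some b => ∃ o, (pairs.map Prod.fst)[b.2]? = some o ∧ aPass1 K pairs = some o := by
  induction K with
  | nil => simp [bLoop_nil, aPass1]
  | cons kw kws ih =>
      cases hF : aFindSheet kw pairs with
      | some o =>
          obtain ⟨q, hq1, hq2⟩ :=
            bLoop_hit kw kws pairs 0 none o (by rintro b ⟨⟩) hF
          rw [hq2]
          exact ⟨o, by simpa using hq1, by simp [aPass1, hF]⟩
      | none =>
          have hs := bLoop_shift kw kws pairs 0 none hF
          simp only [Option.map_none] at hs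
          rw [hs]
          cases hb : bLoop kws (pairs.map Prod.snd) 0 none with
          | none =>
              have := ih; rw [hb] at this
              simp [aPass1, hF, this]
          | some b =>
              have := ih; rw [hb] at this
              obtain ⟨o, ho1, ho2⟩ := this
              exact ⟨o, ho1, by simp [aPass1, hF, ho2]⟩

-- second-pass equivalence
theorem pass2_eq (pairs : List (String × String)) (pos : Nat) :
    match bPass2 (pairs.map Prod.snd) pos with
    | none => aPass2 pairs = none
    | some p => ∃ q, p = pos + q ∧ ∃ o, (pairs.map Prod.fst)[q]? = some o ∧ aPass2 pairs = some o := by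
  induction pairs generalizing pos with
  | nil => simp [bPass2, aPass2]
  | cons hd rest ih =>
      obtain ⟨o, low⟩ := hd
      by_cases hskip : skipKW.any (fun sk => PySem.Str.isIn sk low)
      · simp only [List.map_cons, bPass2, aPass2, hskip, if_true]
        cases hb : bPass2 (rest.map Prod.snd) (pos + 1) with
        | none =>
            have := ih (pos + 1); rw [hb] at this
            exact this
        | some p =>
            have := ih (pos + 1); rw [hb] at this
            obtain ⟨q, hq, o', ho1, ho2⟩ := this
            exact ⟨q + 1, by omega, o', by simpa using ho1, ho2⟩
      · simp only [List.map_cons, bPass2, aPass2, hskip, if_false]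
        exact ⟨0, by omega, o, by simp, rfl⟩

-- ===== VERDICT (by name: the statement is the Claim_ definition above) =====
theorem pick_best_sheet_py_spec : Claim_equal_pick_best_sheet_py := by
  intro sheet_names _ _
  unfold Spec_pick_best_sheet_py pick_best_sheet_py pick_best_sheet_py_alt
  set f : String → String := fun s => PySem.Str.strip (PySem.Str.lower s) with hf
  set pairs : List (String × String) := sheet_names.map (fun s => (s, f s)) with hpairs
  have hsnd : pairs.map Prod.snd = sheet_names.map f := by simp [hpairs]
  have hfst : pairs.map Prod.fst = sheet_names := by simp [hpairs, Function.comp_def]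
  have h1 := pass1_eq preferKW pairs
  rw [hsnd, hfst] at h1
  cases hb : bLoop preferKW (sheet_names.map f) 0 none with
  | some b =>
      rw [hb] at h1
      obtain ⟨o, ho1, ho2⟩ := h1
      simp [ho2, hb, ho1, PySem.List.pyGet?_natCast]
  | none =>
      rw [hb] at h1
      have h2 := pass2_eq pairs 0
      rw [hsnd, hfst] at h2
      cases hp : bPass2 (sheet_names.map f) 0 with
      | some p =>
          rw [hp] at h2
          obtain ⟨q, hq, o, ho1, ho2⟩ := h2
          have hpq : p = q := by omega
          subst hpq
          simp [h1, ho2, hb, hp, ho1, PySem.List.pyGet?_natCast]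
      | none =>
          rw [hp] at h2
          simp [h1, h2, hb, hp]
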